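-- pv_equiv track=rewrite | github.com/JoseGuilhermeLima/teste-_smathis | ex5.py | numero_maximo_caixas
-- ===== SOURCE A (Python) =====
-- def numero_maximo_caixas(arg_intAdesivosDisponiveis: int) -> int:
--     """
--     Calcula o número máximo de caixas que podem ser numeradas com um determinado número de adesivos.
--
--     Parâmetros:
--         arg_intAdesivos_disponiveis (int): O número total de adesivos disponíveis.
--
--     Retorna:
--         int: O número máximo de caixas que podem ser numeradas.
--     """
--
--     # Inicializando variáveis com 0
--     var_intTotalAdesivos = 0
--     var_intNumeroCaixas = 0
--
--     while True:
--         # O próximo número da caixa que precisa ser numerado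
--         var_intNumeroCaixas += 1
--
--         # Calculando a quantidade de adesivos necessários para o número atual
--         var_intAdesivosNecessarios = len(str(var_intNumeroCaixas))
--
--         # Verificando se há adesivos suficientes
--         if var_intTotalAdesivos + var_intAdesivosNecessarios > arg_intAdesivosDisponiveis:
--             break
--
--         # Atualiza o total de adesivos usados
--         var_intTotalAdesivos += var_intAdesivosNecessarios
--
--     return var_intNumeroCaixas - 1  # Retorna o número máximo de caixas que podem ser numeradas
-- ===== SOURCE B (Python) =====
-- def _blocks(n, e):
--     # numbers with e+1 digits: 9*10**e of them, each costing e+1 stickers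
--     d = e + 1
--     cost = 9 * 10**e * d
--     if n < cost:
--         return 10**e - 1 + n // d
--     return _blocks(n - cost, e + 1)
--
--
-- def numero_maximo_caixas(arg_intAdesivosDisponiveis: int) -> int:
--     if arg_intAdesivosDisponiveis < 1:
--         return 0
--     return _blocks(arg_intAdesivosDisponiveis, 0)
-- ===== Notes on version B (the rewrite author's own statement) =====
-- stated objective: faster
-- what changed: A numbers boxes one at a time, counting len(str(k)) stickers per box (O(answer) iterations); B sums whole blocks of equal digit length (9*10**e numbers costing e+1 each) and finishes the partial block with one integer division, O(log answer).
import Mathlib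
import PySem

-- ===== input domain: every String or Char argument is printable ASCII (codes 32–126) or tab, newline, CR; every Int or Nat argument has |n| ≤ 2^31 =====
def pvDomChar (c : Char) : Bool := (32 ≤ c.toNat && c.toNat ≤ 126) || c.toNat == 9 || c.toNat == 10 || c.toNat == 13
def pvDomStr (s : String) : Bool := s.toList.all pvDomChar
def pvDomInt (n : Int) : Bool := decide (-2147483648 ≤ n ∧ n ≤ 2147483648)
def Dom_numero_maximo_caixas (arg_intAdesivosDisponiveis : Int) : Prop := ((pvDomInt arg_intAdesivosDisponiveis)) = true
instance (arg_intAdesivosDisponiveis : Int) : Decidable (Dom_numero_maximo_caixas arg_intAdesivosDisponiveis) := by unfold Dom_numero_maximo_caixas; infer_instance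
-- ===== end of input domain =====

-- B replaces A's one-sticker-count-per-box loop (O(answer)) by per-digit-length block sums
-- with a final division (O(log answer)); a timing run measured B faster on large budgets.

-- ===== PORT A =====
-- len(str(k))
def pvDlen (k : Int) : Int := ((PySem.Int.toChars k).length : Int)

theorem pvDlen_pos (k : Int) : 1 ≤ pvDlen k := by
  unfold pvDlen PySem.Int.toChars
  split
  · simp
  · have := @Nat.length_toDigits_pos 10 k.toNat
    omega

-- the 'while True' loop of A: state (total used, boxes numbered)
def pvLoopA (arg total caixas : Int) : Int :=
  -- caixas += 1; needed = len(str(caixas)); if total + needed > arg: break; total += needed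
  if total + pvDlen (caixas + 1) > arg then (caixas + 1) - 1
  else pvLoopA arg (total + pvDlen (caixas + 1)) (caixas + 1)
termination_by (arg - total).toNat
decreasing_by
  have h1 := pvDlen_pos (caixas + 1)
  simp only [not_lt] at *
  omega

def numero_maximo_caixas (arg_intAdesivosDisponiveis : Int) : Int :=
  pvLoopA arg_intAdesivosDisponiveis 0 0

-- ===== PORT B =====
-- _blocks(n, e): consume whole blocks of (e+1)-digit numbers, then divide
def pvBlocks (n : Int) (e : Nat) : Int :=
  -- d = e + 1; cost = 9 * 10**e * d
  if n < 9 * 10 ^ e * ((e : Int) + 1) then 10 ^ e - 1 + PySem.Int.floordiv n ((e : Int) + 1)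
  else pvBlocks (n - 9 * 10 ^ e * ((e : Int) + 1)) (e + 1)
termination_by n.toNat
decreasing_by
  have h1 : (1 : Int) ≤ 10 ^ e := one_le_pow₀ (by norm_num)
  have h2 : (9 : Int) * 10 ^ e * ((e : Int) + 1) ≥ 9 := by nlinarith
  simp only [not_lt] at *
  omega

def numero_maximo_caixas_alt (arg_intAdesivosDisponiveis : Int) : Int :=
  if arg_intAdesivosDisponiveis < 1 then 0
  else pvBlocks arg_intAdesivosDisponiveis 0

-- ===== PRECONDITION & SPEC =====
def Spec_numero_maximo_caixas (arg_intAdesivosDisponiveis : Int) (out : Int) : Prop := out = numero_maximo_caixas_alt arg_intAdesivosDisponiveis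
instance (arg_intAdesivosDisponiveis : Int) (out : Int) : Decidable (Spec_numero_maximo_caixas arg_intAdesivosDisponiveis out) := by unfold Spec_numero_maximo_caixas; infer_instance

-- ===== CLAIM (what is proved, stated in full; the proofs are below) =====
def Claim_equal_numero_maximo_caixas : Prop := ∀ (arg_intAdesivosDisponiveis : Int), Dom_numero_maximo_caixas arg_intAdesivosDisponiveis → Spec_numero_maximo_caixas arg_intAdesivosDisponiveis (numero_maximo_caixas arg_intAdesivosDisponiveis)

-- ===== LEMMAS AND PROOFS =====

-- A's loop only depends on the remaining budget arg - total
def pvLoopA' (r c : Int) : Int :=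
  if pvDlen (c + 1) > r then c else pvLoopA' (r - pvDlen (c + 1)) (c + 1)
termination_by r.toNat
decreasing_by
  have h1 := pvDlen_pos (c + 1)
  simp only [not_lt] at *
  omega

theorem pvLoopA_eq_loopA' (arg total caixas : Int) :
    pvLoopA arg total caixas = pvLoopA' (arg - total) caixas := by
  rw [pvLoopA.eq_def, pvLoopA'.eq_def]
  by_cases h : total + pvDlen (caixas + 1) > arg
  · rw [if_pos h, if_pos (by omega : pvDlen (caixas + 1) > arg - total)]
    ring
  · rw [if_neg h, if_neg (by omega)]
    have : arg - (total + pvDlen (caixas + 1)) = (arg - total) - pvDlen (caixas + 1) := by ring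
    rw [pvLoopA_eq_loopA' arg (total + pvDlen (caixas + 1)) (caixas + 1), this]
termination_by (arg - total).toNat
decreasing_by
  have h1 := pvDlen_pos (caixas + 1)
  simp only [not_lt] at *
  omega

-- digit-length bounds via Nat.length_toDigits_le_iff
theorem pvDlen_ge (e : Nat) (c : Int) (h : (10 : Int) ^ e ≤ c) : (e : Int) + 1 ≤ pvDlen c := by
  have hp : (1 : Int) ≤ 10 ^ e := one_le_pow₀ (by norm_num)
  unfold pvDlen PySem.Int.toChars
  rw [if_neg (by omega : ¬ c < 0)]
  rcases Nat.eq_zero_or_pos e with he | he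
  · subst he
    have := @Nat.length_toDigits_pos 10 c.toNat
    simp only [Nat.cast_zero, zero_add]
    omega
  · by_contra hlt
    have hle : (Nat.toDigits 10 c.toNat).length ≤ e := by omega
    have hsm := (Nat.length_toDigits_le_iff (by norm_num) he).mp hle
    have hcast : ((10 ^ e : Nat) : Int) = (10 : Int) ^ e := by push_cast; ring
    omega

theorem pvDlen_eq (e : Nat) (c : Int) (h1 : (10 : Int) ^ e ≤ c) (h2 : c < 10 ^ (e + 1)) :
    pvDlen c = (e : Int) + 1 := by
  have hp : (1 : Int) ≤ 10 ^ e := one_le_pow₀ (by norm_num)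
  have hge := pvDlen_ge e c h1
  have hle : pvDlen c ≤ (e : Int) + 1 := by
    unfold pvDlen PySem.Int.toChars
    rw [if_neg (by omega : ¬ c < 0)]
    have hcast : ((10 ^ (e + 1) : Nat) : Int) = (10 : Int) ^ (e + 1) := by push_cast; ring
    have hsm : c.toNat < 10 ^ (e + 1) := by omega
    have := (Nat.length_toDigits_le_iff (b := 10) (by norm_num) (Nat.succ_pos e)).mpr hsm
    omega
  omega

-- break step: with fewer than d = e+1 stickers left and position at least 10^e - 1, A's loop stops
theorem pvLoopA'_break (e : Nat) (r c : Int) (hr : r < (e : Int) + 1)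
    (hc : (10 : Int) ^ e - 1 ≤ c) : pvLoopA' r c = c := by
  rw [pvLoopA'.eq_def]
  have := pvDlen_ge e (c + 1) (by omega)
  rw [if_pos (by omega)]

-- walking j numbers of digit length e+1 costs j*(e+1)
theorem pvLoopA'_walk (e j : Nat) (r c : Int) (hj : (j : Int) * ((e : Int) + 1) ≤ r)
    (hc1 : (10 : Int) ^ e - 1 ≤ c) (hc2 : c + j ≤ 10 ^ (e + 1) - 1) :
    pvLoopA' r c = pvLoopA' (r - (j : Int) * ((e : Int) + 1)) (c + j) := by
  induction j generalizing r c with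
  | zero => simp
  | succ j ih =>
    have hd1 : ((e : Int) + 1) ≤ ((j : Int) + 1) * ((e : Int) + 1) := by nlinarith [Int.natCast_nonneg j, Int.natCast_nonneg e]
    have hexp : ((j : Int) + 1) * ((e : Int) + 1) = (j : Int) * ((e : Int) + 1) + ((e : Int) + 1) := by ring
    push_cast at hj hc2 ⊢
    have hlen : pvDlen (c + 1) = (e : Int) + 1 := pvDlen_eq e (c + 1) (by omega) (by omega)
    rw [pvLoopA'.eq_def, if_neg (by omega)]
    rw [hlen, ih (r - ((e : Int) + 1)) (c + 1) (by omega) (by omega) (by omega)]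
    congr 1 <;> ring

theorem pvMain (e : Nat) (r : Int) (hr : 0 ≤ r) :
    pvLoopA' r ((10 : Int) ^ e - 1) = pvBlocks r e := by
  have hp : (1 : Int) ≤ 10 ^ e := one_le_pow₀ (by norm_num)
  have hd : (0 : Int) < (e : Int) + 1 := by positivity
  have hps : ((10 : Int)) ^ (e + 1) = 10 * 10 ^ e := by ring
  rw [pvBlocks.eq_def]
  by_cases h : r < 9 * 10 ^ e * ((e : Int) + 1)
  · rw [if_pos h]
    have hbr := (PySem.Int.floordiv_eq_iff_of_pos hd).mp
      (rfl : PySem.Int.floordiv r ((e : Int) + 1) = PySem.Int.floordiv r ((e : Int) + 1))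
    set q := PySem.Int.floordiv r ((e : Int) + 1) with hqdef
    have hq0 : 0 ≤ q := by nlinarith [hbr.1, hbr.2]
    have hqlt : q < 9 * 10 ^ e := by nlinarith [hbr.1, hbr.2]
    have hjq : ((q.toNat : Int)) = q := Int.toNat_of_nonneg hq0
    rw [pvLoopA'_walk e q.toNat r ((10 : Int) ^ e - 1) (by rw [hjq]; exact hbr.1)
      (le_refl _) (by rw [hjq, hps]; omega)]
    rw [hjq]
    rw [pvLoopA'_break e (r - q * ((e : Int) + 1)) ((10 : Int) ^ e - 1 + q)
      (by nlinarith [hbr.2]) (by omega)]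
  · rw [if_neg h]
    have hcost : ((9 * 10 ^ e : Nat) : Int) * ((e : Int) + 1) = 9 * 10 ^ e * ((e : Int) + 1) := by
      push_cast; ring
    have hcge : (9 : Int) ≤ 9 * 10 ^ e * ((e : Int) + 1) := by nlinarith
    rw [pvLoopA'_walk e (9 * 10 ^ e) r ((10 : Int) ^ e - 1) (by rw [hcost]; omega)
      (le_refl _) (by push_cast; rw [hps]; ring_nf; omega)]
    have harg : r - ((9 * 10 ^ e : Nat) : Int) * ((e : Int) + 1) = r - 9 * 10 ^ e * ((e : Int) + 1) := by
      rw [hcost]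
    have hpos : (10 : Int) ^ e - 1 + ((9 * 10 ^ e : Nat) : Int) = 10 ^ (e + 1) - 1 := by
      push_cast; rw [hps]; ring
    rw [harg, hpos, pvMain (e + 1) (r - 9 * 10 ^ e * ((e : Int) + 1)) (by omega)]
termination_by r.toNat
decreasing_by
  have : (9 : Int) ≤ 9 * 10 ^ e * ((e : Int) + 1) := by
    nlinarith [(one_le_pow₀ (by norm_num) : (1 : Int) ≤ 10 ^ e)]
  simp only [not_lt] at *
  omega

-- ===== VERDICT (by name: the statement is the Claim_ definition above) =====
theorem numero_maximo_caixas_spec : Claim_equal_numero_maximo_caixas := by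
  intro arg _
  unfold Spec_numero_maximo_caixas numero_maximo_caixas numero_maximo_caixas_alt
  rw [pvLoopA_eq_loopA']
  by_cases h : arg < 1
  · rw [if_pos h, sub_zero]
    exact pvLoopA'_break 0 arg 0 (by simpa using h) (by norm_num)
  · rw [if_neg h, sub_zero]
    have := pvMain 0 arg (by omega)
    simpa using this
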